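-- pv_equiv track=rewrite | github.com/questionmarksoap/palabras | irregapi3.py | make_nos_orders
-- ===== SOURCE A (Python) =====
-- a2 = ['tocar', 'ubicar', 'verificar', 'acercarse', 'aplicar', 'atacar', 'buscar', 'colocar', 'comunicar', 'dedicar', 'enfocar', 'explicar', 'fabricar', 'identificar', 'indicar', 'practicar', 'publicar', 'sacar', 'significar', 'simplificar']
--
-- a3 = ['apagar', 'entregar', 'llegar', 'arriesgar', 'descargar', 'investigar', 'obligar', 'pagar']
--
-- a11 = ['almorzar', 'forzar']
--
-- e3 = ['agradecer', 'conocer', 'crecer', 'desaparecer', 'nacer', 'aparecer', 'establecer', 'ofrecer', 'parecer', 'permanecer', 'reconocer']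
--
-- i11 = ['sentir', 'sentirse', 'sugerir', 'convertir', 'herir', 'mentir', 'preferir','referir']
--
-- a4 = ['abrazar', 'alcanzar', 'aterrizar', 'avanzar', 'cruzar', 'lanzar', 'realizar', 'rechazar', 'utilizar']
--
-- def make_nos_orders(verb):
--     if  verb in a2:
--         stem_changes = {'car': 'qu', 'carse': 'qu'}
--         for orig, change in stem_changes.items():
--             if orig in verb:
--                 irr_form = verb.replace(orig, change)
--                 return f"{irr_form[:-2]}émonos" if verb.endswith("se") else f"{irr_form}emos"
--     elif verb in a3:
--         stem_changes = {'gar': 'guar'}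
--         for orig, change in stem_changes.items():
--             if orig in verb:
--                 irr_form = verb.replace(orig, change)
--                 return f"{irr_form[:-4]}émonos" if verb.endswith("se") else f"{irr_form[:-2]}emos"
--     elif verb in a11:
--         stem_changes = {'orz': 'orc'}
--         for orig, change in stem_changes.items():
--             if orig in verb:
--                 irr_form = verb.replace(orig, change)
--                 return f"{irr_form[:-4]}émonos" if verb.endswith("se") else f"{irr_form[:-2]}emos"
--     elif verb in e3:
--         stem_changes = {'cer': 'zcer'}
--         for orig, change in stem_changes.items():
--             if orig in verb:
--                 irr_form = verb.replace(orig, change)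
--                 return f"{irr_form[:-4]}amanos" if verb.endswith("se") else f"{irr_form[:-2]}amos"
--     elif verb in i11:
--         stem_changes = {'en': 'in', 'er': 'ir'}
--         for orig, change in stem_changes.items():
--             if orig in verb:
--                 irr_form = verb.replace(orig, change)
--                 return f"{irr_form[:-4]}ámonos" if verb.endswith("se") else f"{irr_form[:-2]}amos"
--     elif verb in a4:
--         stem_changes = {'zar': 'car'}
--         for orig, change in stem_changes.items():
--             if orig in verb:
--                 irr_form = verb.replace(orig, change)
--                 return f"{irr_form[:-4]}émonos" if verb.endswith("se") else f"{irr_form[:-2]}emos"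
--     elif verb.endswith("ar "):
--         return verb[:-3] + "emos"
--     elif verb.endswith("er ") or verb.endswith("ir "):
--         return verb[:-3] + "amos"
--     if verb.endswith("ar"):
--         return verb[:-2] + "emos"
--     elif verb.endswith("er") or verb.endswith("ir"):
--         return verb[:-2] + "amos"
--     if verb.endswith("arse"):
--         return verb[:-4] + "émonos"
--     elif verb.endswith("irse") or verb.endswith("erse"):
--         return verb[:-4] + "amonos"
--     else:
--         return ""
--     return verb
-- ===== SOURCE B (Python) =====
-- a2 = ['tocar', 'ubicar', 'verificar', 'acercarse', 'aplicar', 'atacar', 'buscar', 'colocar', 'comunicar', 'dedicar', 'enfocar', 'explicar', 'fabricar', 'identificar', 'indicar', 'practicar', 'publicar', 'sacar', 'significar', 'simplificar']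
-- a3 = ['apagar', 'entregar', 'llegar', 'arriesgar', 'descargar', 'investigar', 'obligar', 'pagar']
-- a11 = ['almorzar', 'forzar']
-- e3 = ['agradecer', 'conocer', 'crecer', 'desaparecer', 'nacer', 'aparecer', 'establecer', 'ofrecer', 'parecer', 'permanecer', 'reconocer']
-- i11 = ['sentir', 'sentirse', 'sugerir', 'convertir', 'herir', 'mentir', 'preferir', 'referir']
-- a4 = ['abrazar', 'alcanzar', 'aterrizar', 'avanzar', 'cruzar', 'lanzar', 'realizar', 'rechazar', 'utilizar']
--
-- # One rule record per irregular group: (members, ordered substitutions,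
-- # (trim, ending) for the plain case, (trim, ending) for the reflexive case).
-- _RULES = [
--     (a2,  [('car', 'qu'), ('carse', 'qu')], (0, 'emos'), (2, 'émonos')),
--     (a3,  [('gar', 'guar')],                (2, 'emos'), (4, 'émonos')),
--     (a11, [('orz', 'orc')],                 (2, 'emos'), (4, 'émonos')),
--     (e3,  [('cer', 'zcer')],                (2, 'amos'), (4, 'amanos')),
--     (i11, [('en', 'in'), ('er', 'ir')],     (2, 'amos'), (4, 'ámonos')),
--     (a4,  [('zar', 'car')],                 (2, 'emos'), (4, 'émonos')),
-- ]
--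
-- # Build the full verb -> form table once at import time.
-- _IRREGULAR = {}
-- for _members, _subs, _plain, _refl in _RULES:
--     for _v in _members:
--         for _find, _repl in _subs:
--             if _find in _v:
--                 _form = _v.replace(_find, _repl)
--                 _trim, _end = _refl if _v.endswith('se') else _plain
--                 _IRREGULAR[_v] = _form[:len(_form) - _trim] + _end
--                 break
--
-- # First-match suffix table for the regular fall-through.
-- _SUFFIXES = [('ar ', 3, 'emos'), ('er ', 3, 'amos'), ('ir ', 3, 'amos'),
--              ('ar', 2, 'emos'), ('er', 2, 'amos'), ('ir', 2, 'amos'),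
--              ('arse', 4, 'émonos'), ('irse', 4, 'amonos'), ('erse', 4, 'amonos')]
--
-- def make_nos_orders(verb):
--     hit = _IRREGULAR.get(verb)
--     if hit is not None:
--         return hit
--     for suf, n, ending in _SUFFIXES:
--         if verb.endswith(suf):
--             return verb[:-n] + ending
--     return ""
-- ===== Notes on version B (the rewrite author's own statement) =====
-- stated objective: simpler
-- what changed: Replaces the six near-duplicate membership branches (each with its own stem_changes dict loop and format strings) by one precomputed verb-to-form dictionary built once from rule records, plus a single first-match suffix table for the regular fall-through.
import Mathlib
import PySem

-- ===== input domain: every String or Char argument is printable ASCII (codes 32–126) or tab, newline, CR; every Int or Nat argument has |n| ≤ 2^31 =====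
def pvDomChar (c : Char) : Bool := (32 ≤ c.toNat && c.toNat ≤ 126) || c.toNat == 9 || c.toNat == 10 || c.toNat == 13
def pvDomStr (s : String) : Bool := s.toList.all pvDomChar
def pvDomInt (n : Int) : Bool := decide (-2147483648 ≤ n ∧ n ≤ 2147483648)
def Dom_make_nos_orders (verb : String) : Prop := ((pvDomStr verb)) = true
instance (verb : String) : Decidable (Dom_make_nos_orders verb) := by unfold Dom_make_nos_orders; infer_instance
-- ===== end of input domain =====

-- B replaces the six near-identical membership branches by one precomputed verb→form
-- table (built once from rule records) plus a first-match suffix table (objective: simpler).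

-- ===== PORT A =====
def a2L : List String := ["tocar", "ubicar", "verificar", "acercarse", "aplicar", "atacar", "buscar", "colocar", "comunicar", "dedicar", "enfocar", "explicar", "fabricar", "identificar", "indicar", "practicar", "publicar", "sacar", "significar", "simplificar"]
def a3L : List String := ["apagar", "entregar", "llegar", "arriesgar", "descargar", "investigar", "obligar", "pagar"]
def a11L : List String := ["almorzar", "forzar"]
def e3L : List String := ["agradecer", "conocer", "crecer", "desaparecer", "nacer", "aparecer", "establecer", "ofrecer", "parecer", "permanecer", "reconocer"]
def i11L : List String := ["sentir", "sentirse", "sugerir", "convertir", "herir", "mentir", "preferir", "referir"]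
def a4L : List String := ["abrazar", "alcanzar", "aterrizar", "avanzar", "cruzar", "lanzar", "realizar", "rechazar", "utilizar"]

def make_nos_orders (verb : String) : String :=
  -- the `if verb.endswith("arse")` statement group (Python's final `return verb` is unreachable: the else returns "")
  let rest2 : String :=
    if PySem.Str.endswith verb "arse" then PySem.Str.slice verb none (some (-4)) ++ "émonos"
    else if PySem.Str.endswith verb "irse" || PySem.Str.endswith verb "erse" then PySem.Str.slice verb none (some (-4)) ++ "amonos"
    else ""
  -- the `if verb.endswith("ar")` statement group; no match falls through to rest2
  let rest1 : String :=
    if PySem.Str.endswith verb "ar" then PySem.Str.slice verb none (some (-2)) ++ "emos"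
    else if PySem.Str.endswith verb "er" || PySem.Str.endswith verb "ir" then PySem.Str.slice verb none (some (-2)) ++ "amos"
    else rest2
  -- `for orig, change in stem_changes.items(): if orig in verb: return fmt(verb.replace(orig, change))`;
  -- a loop that does not return falls through to the `if verb.endswith("ar")` statement (rest1)
  let tryLoop : List (String × String) → (String → String) → String := fun changes fmt =>
    match changes.findSome? (fun oc =>
      if PySem.Str.isIn oc.1 verb then some (fmt (PySem.Str.replace verb oc.1 oc.2)) else none) with
    | some r => r
    | none => rest1
  if a2L.contains verb then
    tryLoop [("car", "qu"), ("carse", "qu")] (fun irr =>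
      if PySem.Str.endswith verb "se" then PySem.Str.slice irr none (some (-2)) ++ "émonos" else irr ++ "emos")
  else if a3L.contains verb then
    tryLoop [("gar", "guar")] (fun irr =>
      if PySem.Str.endswith verb "se" then PySem.Str.slice irr none (some (-4)) ++ "émonos" else PySem.Str.slice irr none (some (-2)) ++ "emos")
  else if a11L.contains verb then
    tryLoop [("orz", "orc")] (fun irr =>
      if PySem.Str.endswith verb "se" then PySem.Str.slice irr none (some (-4)) ++ "émonos" else PySem.Str.slice irr none (some (-2)) ++ "emos")
  else if e3L.contains verb then
    tryLoop [("cer", "zcer")] (fun irr =>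
      if PySem.Str.endswith verb "se" then PySem.Str.slice irr none (some (-4)) ++ "amanos" else PySem.Str.slice irr none (some (-2)) ++ "amos")
  else if i11L.contains verb then
    tryLoop [("en", "in"), ("er", "ir")] (fun irr =>
      if PySem.Str.endswith verb "se" then PySem.Str.slice irr none (some (-4)) ++ "ámonos" else PySem.Str.slice irr none (some (-2)) ++ "amos")
  else if a4L.contains verb then
    tryLoop [("zar", "car")] (fun irr =>
      if PySem.Str.endswith verb "se" then PySem.Str.slice irr none (some (-4)) ++ "émonos" else PySem.Str.slice irr none (some (-2)) ++ "emos")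
  else if PySem.Str.endswith verb "ar " then PySem.Str.slice verb none (some (-3)) ++ "emos"
  else if PySem.Str.endswith verb "er " || PySem.Str.endswith verb "ir " then PySem.Str.slice verb none (some (-3)) ++ "amos"
  else rest1

-- ===== PORT B =====
-- one rule record per irregular group: (members, ordered substitutions, plain (trim, ending), reflexive (trim, ending))
def rulesB : List (List String × List (String × String) × (Int × String) × (Int × String)) :=
  [ (a2L,  [("car", "qu"), ("carse", "qu")], (0, "emos"), (2, "émonos")),
    (a3L,  [("gar", "guar")],                (2, "emos"), (4, "émonos")),
    (a11L, [("orz", "orc")],                 (2, "emos"), (4, "émonos")),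
    (e3L,  [("cer", "zcer")],                (2, "amos"), (4, "amanos")),
    (i11L, [("en", "in"), ("er", "ir")],     (2, "amos"), (4, "ámonos")),
    (a4L,  [("zar", "car")],                 (2, "emos"), (4, "émonos")) ]

-- the verb → form table, built once from the rule records (the module-level loop of Source B)
def irregularTable : PySem.Dict String String :=
  rulesB.foldl (fun d r =>
    r.1.foldl (fun d v =>
      match r.2.1.findSome? (fun fr =>
        if PySem.Str.isIn fr.1 v then
          let form := PySem.Str.replace v fr.1 fr.2
          let te := if PySem.Str.endswith v "se" then r.2.2.2 else r.2.2.1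
          some (PySem.Str.slice form none (some ((PySem.Str.len form : Int) - te.1)) ++ te.2)
        else none) with
      | some out => d.insert v out
      | none => d) d) PySem.Dict.empty

-- first-match suffix table for the regular fall-through
def suffixesB : List (String × Int × String) :=
  [("ar ", 3, "emos"), ("er ", 3, "amos"), ("ir ", 3, "amos"),
   ("ar", 2, "emos"), ("er", 2, "amos"), ("ir", 2, "amos"),
   ("arse", 4, "émonos"), ("irse", 4, "amonos"), ("erse", 4, "amonos")]

def make_nos_orders_alt (verb : String) : String :=
  match irregularTable.get? verb with
  | some hit => hit
  | none =>
    match suffixesB.findSome? (fun s =>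
      if PySem.Str.endswith verb s.1 then some (PySem.Str.slice verb none (some (-s.2.1)) ++ s.2.2) else none) with
    | some r => r
    | none => ""

-- ===== PRECONDITION & SPEC =====
def Spec_make_nos_orders (verb : String) (out : String) : Prop := out = make_nos_orders_alt verb
instance (verb : String) (out : String) : Decidable (Spec_make_nos_orders verb out) := by unfold Spec_make_nos_orders; infer_instance

-- ===== CLAIM (what is proved, stated in full; the proofs are below) =====
def Claim_equal_make_nos_orders : Prop := ∀ (verb : String), Dom_make_nos_orders verb → Spec_make_nos_orders verb (make_nos_orders verb)

-- ===== LEMMAS AND PROOFS =====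
set_option maxRecDepth 100000
set_option maxHeartbeats 1000000
def allVerbsP : List String := a2L ++ a3L ++ a11L ++ e3L ++ i11L ++ a4L

theorem mem_case : ∀ v ∈ allVerbsP, make_nos_orders v = make_nos_orders_alt v := by decide

theorem keys_table : irregularTable.keys = allVerbsP := by decide

-- A's fall-through suffix logic, written out once (proof helper)
def tailA (v : String) : String :=
  if PySem.Str.endswith v "ar " then PySem.Str.slice v none (some (-3)) ++ "emos"
  else if PySem.Str.endswith v "er " || PySem.Str.endswith v "ir " then PySem.Str.slice v none (some (-3)) ++ "amos"
  else if PySem.Str.endswith v "ar" then PySem.Str.slice v none (some (-2)) ++ "emos"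
  else if PySem.Str.endswith v "er" || PySem.Str.endswith v "ir" then PySem.Str.slice v none (some (-2)) ++ "amos"
  else if PySem.Str.endswith v "arse" then PySem.Str.slice v none (some (-4)) ++ "émonos"
  else if PySem.Str.endswith v "irse" || PySem.Str.endswith v "erse" then PySem.Str.slice v none (some (-4)) ++ "amonos"
  else ""

theorem tails_eq (v : String) :
    tailA v =
      (match suffixesB.findSome? (fun s =>
        if PySem.Str.endswith v s.1 then some (PySem.Str.slice v none (some (-s.2.1)) ++ s.2.2) else none) with
      | some r => r
      | none => "") := by
  unfold tailA suffixesB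
  cases h1 : PySem.Chars.endswith v.toList ['a', 'r', ' '] <;>
  cases h2 : PySem.Chars.endswith v.toList ['e', 'r', ' '] <;>
  cases h3 : PySem.Chars.endswith v.toList ['i', 'r', ' '] <;>
  cases h4 : PySem.Chars.endswith v.toList ['a', 'r'] <;>
  cases h5 : PySem.Chars.endswith v.toList ['e', 'r'] <;>
  cases h6 : PySem.Chars.endswith v.toList ['i', 'r'] <;>
  cases h7 : PySem.Chars.endswith v.toList ['a', 'r', 's', 'e'] <;>
  cases h8 : PySem.Chars.endswith v.toList ['i', 'r', 's', 'e'] <;>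
  cases h9 : PySem.Chars.endswith v.toList ['e', 'r', 's', 'e'] <;>
  simp [List.findSome?, h1, h2, h3, h4, h5, h6, h7, h8, h9]

theorem nonmem_case (v : String) (h : v ∉ allVerbsP) : make_nos_orders v = make_nos_orders_alt v := by
  have hg : irregularTable.get? v = none := by
    rw [PySem.Dict.get?_eq_none_iff_not_mem_keys, keys_table]; exact h
  simp only [allVerbsP, List.mem_append, not_or] at h
  obtain ⟨⟨⟨⟨⟨h2, h3⟩, h11⟩, he3⟩, hi11⟩, h4⟩ := h
  have c2 : a2L.contains v = false := by simpa using h2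
  have c3 : a3L.contains v = false := by simpa using h3
  have c11 : a11L.contains v = false := by simpa using h11
  have ce3 : e3L.contains v = false := by simpa using he3
  have ci11 : i11L.contains v = false := by simpa using hi11
  have c4 : a4L.contains v = false := by simpa using h4
  have ha : make_nos_orders v = tailA v := by
    unfold make_nos_orders tailA
    simp only [c2, c3, c11, ce3, ci11, c4, Bool.false_eq_true, if_false]
  have hb : make_nos_orders_alt v =
      (match suffixesB.findSome? (fun s =>
        if PySem.Str.endswith v s.1 then some (PySem.Str.slice v none (some (-s.2.1)) ++ s.2.2) else none) with
      | some r => r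
      | none => "") := by
    unfold make_nos_orders_alt
    rw [hg]
  rw [ha, hb, tails_eq]

theorem make_nos_orders_agree (v : String) : make_nos_orders v = make_nos_orders_alt v := by
  by_cases h : v ∈ allVerbsP
  · exact mem_case v h
  · exact nonmem_case v h

-- ===== VERDICT (by name: the statement is the Claim_ definition above) =====
theorem make_nos_orders_spec : Claim_equal_make_nos_orders := by
  intro verb _
  unfold Spec_make_nos_orders
  exact make_nos_orders_agree verb
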